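-- pv_equiv track=rewrite | github.com/sboupda/atdd | src/atdd/coach/commands/issue_template.py | _iter_section_slices
-- ===== SOURCE A (Python) =====
-- def _iter_section_slices(body: str) -> list[tuple[str, str]]:
--     """Split a body into (section_heading, section_text) pairs.
--
--     Anything before the first `## ` heading is returned under a synthetic
--     "(preamble)" key.
--     """
--     slices: list[tuple[str, str]] = []
--     current_name = "(preamble)"
--     current_lines: list[str] = []
--     for line in body.splitlines():
--         if line.startswith("## ") and not line.startswith("### "):
--             slices.append((current_name, "\n".join(current_lines)))
--             current_name = line.rstrip()
--             current_lines = []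
--         else:
--             current_lines.append(line)
--     slices.append((current_name, "\n".join(current_lines)))
--     return slices
-- ===== SOURCE B (Python) =====
-- def _iter_section_slices(body: str) -> list[tuple[str, str]]:
--     """Split a body into (section_heading, section_text) pairs.
--
--     Recursive decomposition: the text up to the first `## ` heading forms one
--     section; the rest is split recursively under that heading's name.
--     """
--     def is_head(l):
--         return l.startswith("## ") and not l.startswith("### ")
--
--     def sections(name, lines):
--         for k, l in enumerate(lines):
--             if is_head(l):
--                 return [(name, "\n".join(lines[:k]))] + sections(l.rstrip(), lines[k + 1:])
--         return [(name, "\n".join(lines))]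
--
--     return sections("(preamble)", body.splitlines())
-- ===== Notes on version B (the rewrite author's own statement) =====
-- stated objective: alternative
-- what changed: Replaces the flush-on-encounter accumulator loop with a recursive decomposition: find the first heading, emit the prefix as one section, and recurse on the remainder under that heading's name.
import Mathlib
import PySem

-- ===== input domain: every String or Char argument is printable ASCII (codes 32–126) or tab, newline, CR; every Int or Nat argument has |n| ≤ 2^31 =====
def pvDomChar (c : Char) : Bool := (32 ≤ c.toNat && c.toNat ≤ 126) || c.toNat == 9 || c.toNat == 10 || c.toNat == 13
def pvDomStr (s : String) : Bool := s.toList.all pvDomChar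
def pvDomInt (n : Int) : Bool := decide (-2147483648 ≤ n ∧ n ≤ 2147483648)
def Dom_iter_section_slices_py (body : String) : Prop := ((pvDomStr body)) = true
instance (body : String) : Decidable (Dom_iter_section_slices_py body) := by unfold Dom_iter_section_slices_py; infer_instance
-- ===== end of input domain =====

-- B re-implements the section splitter recursively (find first heading, emit prefix, recurse)
-- instead of A's flush-on-encounter accumulator loop; same O(n) cost, alternative decomposition.

-- ===== PORT A =====
-- one iteration of A's `for line in body.splitlines()` loop, over the state
-- (slices, current_name, current_lines)
def aStep (st : List (String × String) × String × List String) (line : String) :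
    List (String × String) × String × List String :=
  if PySem.Str.startswith line "## " && !(PySem.Str.startswith line "### ") then
    (st.1 ++ [(st.2.1, PySem.Str.join "\n" st.2.2)], PySem.Str.rstrip line, [])
  else
    (st.1, st.2.1, st.2.2 ++ [line])

def iter_section_slices_py (body : String) : List (String × String) :=
  let st := (PySem.Str.splitlines body).foldl aStep ([], "(preamble)", [])
  st.1 ++ [(st.2.1, PySem.Str.join "\n" st.2.2)]

-- ===== PORT B =====
-- Source B's `is_head`
def isHeadB (l : String) : Bool :=
  PySem.Str.startswith l "## " && !(PySem.Str.startswith l "### ")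

-- Source B's recursive `sections`: the `for k, l in enumerate(lines): if is_head(l): …`
-- scan for the first heading index is `List.findIdx?`; the slices `lines[:k]` and
-- `lines[k+1:]` (0 ≤ k < len(lines)) are exactly `take k` / `drop (k+1)` there.
def sectionsB (name : String) (lines : List String) : List (String × String) :=
  match h : lines.findIdx? isHeadB with
  | some k =>
      (name, PySem.Str.join "\n" (lines.take k)) ::
        sectionsB
          (PySem.Str.rstrip (lines.getD k ""))
          (lines.drop (k + 1))
  | none => [(name, PySem.Str.join "\n" lines)]
termination_by lines.length
decreasing_by
  have hk : k < lines.length := (List.findIdx?_eq_some_iff_findIdx_eq.mp h).1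
  simp [List.length_drop]; omega

def iter_section_slices_py_alt (body : String) : List (String × String) :=
  sectionsB "(preamble)" (PySem.Str.splitlines body)

-- ===== PRECONDITION & SPEC =====
def Spec_iter_section_slices_py (body : String) (out : List (String × String)) : Prop := out = iter_section_slices_py_alt body
instance (body : String) (out : List (String × String)) : Decidable (Spec_iter_section_slices_py body out) := by unfold Spec_iter_section_slices_py; infer_instance

-- ===== CLAIM (what is proved, stated in full; the proofs are below) =====
def Claim_equal_iter_section_slices_py : Prop := ∀ (body : String), Dom_iter_section_slices_py body → Spec_iter_section_slices_py body (iter_section_slices_py body)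

-- ===== LEMMAS AND PROOFS =====

-- common skeleton: the sections with their text kept as a list of lines
def gSec (name : String) : List String → List (String × List String)
  | [] => [(name, [])]
  | l :: ls =>
      if isHeadB l then (name, []) :: gSec (PySem.Str.rstrip l) ls
      else
        match gSec name ls with
        | [] => []
        | (n, t) :: r => (n, l :: t) :: r

def prependCur (cur : List String) : List (String × List String) → List (String × List String)
  | [] => []
  | (n, t) :: r => (n, cur ++ t) :: r

def joinSecs (l : List (String × List String)) : List (String × String) :=
  l.map (fun p => (p.1, PySem.Str.join "\n" p.2))

theorem gSec_ne_nil (ls : List String) (name : String) : gSec name ls ≠ [] := by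
  induction ls generalizing name with
  | nil => simp [gSec]
  | cons l ls ih =>
    simp only [gSec]
    split
    · simp
    · cases h : gSec name ls with
      | nil => exact absurd h (ih name)
      | cons p r => cases p; simp

theorem prependCur_nil (l : List (String × List String)) : prependCur [] l = l := by
  cases l with
  | nil => rfl
  | cons p r => cases p; simp [prependCur]

-- A's loop computes `sl ++` the joined sections, with `cur` pending in front of the first one
theorem aLoop_eq (ls : List String) (sl : List (String × String)) (name : String)
    (cur : List String) :
    (ls.foldl aStep (sl, name, cur)).1
        ++ [((ls.foldl aStep (sl, name, cur)).2.1,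
             PySem.Str.join "\n" (ls.foldl aStep (sl, name, cur)).2.2)]
      = sl ++ joinSecs (prependCur cur (gSec name ls)) := by
  induction ls generalizing sl name cur with
  | nil => simp [gSec, prependCur, joinSecs]
  | cons l ls ih =>
    simp only [List.foldl_cons, aStep]
    rw [show (PySem.Str.startswith l "## " && !(PySem.Str.startswith l "### ")) = isHeadB l
          from rfl]
    by_cases hl : isHeadB l
    · simp only [hl, if_true, gSec]
      rw [ih]
      cases hg : gSec (PySem.Str.rstrip l) ls with
      | nil => exact absurd hg (gSec_ne_nil _ _)
      | cons p r =>
        cases p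
        simp [prependCur, joinSecs]
    · simp only [hl, if_false, gSec, Bool.false_eq_true]
      rw [ih]
      cases hg : gSec name ls with
      | nil => exact absurd hg (gSec_ne_nil _ _)
      | cons p r =>
        cases p
        simp [prependCur, joinSecs]

theorem gSec_no_head (ls : List String) (name : String)
    (h : ∀ x ∈ ls, isHeadB x = false) : gSec name ls = [(name, ls)] := by
  induction ls generalizing name with
  | nil => rfl
  | cons l ls ih =>
    have hl : isHeadB l = false := h l (List.mem_cons_self ..)
    simp only [gSec, hl, Bool.false_eq_true, if_false]
    rw [ih name (fun x hx => h x (List.mem_cons_of_mem _ hx))]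

theorem gSec_split (pre : List String) (hpre : ∀ x ∈ pre, isHeadB x = false)
    (name hd : String) (rest : List String) (hhd : isHeadB hd = true) :
    gSec name (pre ++ hd :: rest)
      = (name, pre) :: gSec (PySem.Str.rstrip hd) rest := by
  induction pre generalizing name with
  | nil => simp [gSec, hhd]
  | cons p pre ih =>
    have hp : isHeadB p = false := hpre p (List.mem_cons_self ..)
    simp only [List.cons_append, gSec, hp, Bool.false_eq_true, if_false]
    rw [ih (fun x hx => hpre x (List.mem_cons_of_mem _ hx)) name]

theorem sectionsB_eq (name : String) (ls : List String) :
    sectionsB name ls = joinSecs (gSec name ls) := by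
  induction hi : ls.length using Nat.strong_induction_on generalizing name ls with
  | _ n ih =>
    rw [sectionsB]
    split
    · rename_i k hk
      obtain ⟨hlt, hpk, hbefore⟩ := List.findIdx?_eq_some_iff_getElem.mp hk
      have hdecomp : ls.take k ++ ls[k] :: ls.drop (k + 1) = ls := by
        rw [List.getElem_cons_drop]; simp
      have hpre : ∀ x ∈ ls.take k, isHeadB x = false := by
        intro x hx
        obtain ⟨j, hj, rfl⟩ := List.mem_take_iff_getElem.mp hx
        exact Bool.not_eq_true _ ▸ hbefore j (by omega)
      have hg := gSec_split (ls.take k) hpre name ls[k] (ls.drop (k + 1)) hpk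
      rw [hdecomp] at hg
      have hgetD : ls.getD k "" = ls[k] := List.getD_eq_getElem ls "" hlt
      rw [hg, hgetD, ih (ls.drop (k + 1)).length (by subst hi; simp; omega) _ _ rfl]
      simp [joinSecs]
    · rename_i hk
      have hall : ∀ x ∈ ls, isHeadB x = false := List.findIdx?_eq_none_iff.mp hk
      rw [gSec_no_head ls name hall]
      simp [joinSecs]

-- ===== VERDICT (by name: the statement is the Claim_ definition above) =====
theorem iter_section_slices_py_spec : Claim_equal_iter_section_slices_py := by
  intro body _
  unfold Spec_iter_section_slices_py iter_section_slices_py iter_section_slices_py_alt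
  rw [sectionsB_eq]
  have h := aLoop_eq (PySem.Str.splitlines body) [] "(preamble)" []
  rw [prependCur_nil] at h
  simpa using h
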